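-- pv_equiv track=rewrite | github.com/Amirshox/ProblemSolving | binarysearch.com/K-and-K.py | solve
-- ===== SOURCE A (Python) =====
-- def solve(nums):
--     res = -1
--     table = {}
--
--     for n in nums:
--         if -n in table or not n:
--             res = max(res, abs(n))
--
--         table[n] = True
--
--     return res
-- ===== SOURCE B (Python) =====
-- def solve(nums):
--     s = set(nums)
--     return max((abs(n) for n in nums if -n in s), default=-1)
-- ===== Notes on version B (the rewrite author's own statement) =====
-- stated objective: simpler
-- what changed: A's single interleaved check-then-insert dict loop becomes a build-the-set-then-reduce decomposition: materialize set(nums) once, then take max(abs(n) for n in nums if -n in s) with default -1; the 'or not n' zero guard disappears because -0 == 0 is always in s.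
import Mathlib
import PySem

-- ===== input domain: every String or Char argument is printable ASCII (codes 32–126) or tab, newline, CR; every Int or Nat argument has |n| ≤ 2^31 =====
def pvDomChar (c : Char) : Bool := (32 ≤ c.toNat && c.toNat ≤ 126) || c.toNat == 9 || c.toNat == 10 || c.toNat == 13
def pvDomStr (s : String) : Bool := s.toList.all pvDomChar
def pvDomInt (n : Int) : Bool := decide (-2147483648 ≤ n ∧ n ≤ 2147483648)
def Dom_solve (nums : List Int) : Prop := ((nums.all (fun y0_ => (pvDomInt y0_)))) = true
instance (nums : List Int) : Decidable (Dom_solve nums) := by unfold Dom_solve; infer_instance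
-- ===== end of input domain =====

-- B replaces A's interleaved check-then-insert dict loop by build-set-then-reduce (simpler decomposition, same O(n) cost).

-- ===== PORT A =====
def solve (nums : List Int) : Int :=
  (nums.foldl
    (fun (st : Int × PySem.Dict Int Bool) n =>
      let res := if st.2.contains (-n) || n == 0 then max st.1 |n| else st.1
      (res, st.2.insert n true))
    (-1, PySem.Dict.empty)).1

-- ===== PORT B =====
def solve_alt (nums : List Int) : Int :=
  let s : PySem.Set Int := PySem.Set.ofList nums
  ((nums.filter (fun n => PySem.Set.contains s (-n))).map (fun n => |n|)).foldl max (-1)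

-- ===== PRECONDITION & SPEC =====
def Spec_solve (nums : List Int) (out : Int) : Prop := out = solve_alt nums
instance (nums : List Int) (out : Int) : Decidable (Spec_solve nums out) := by unfold Spec_solve; infer_instance

-- ===== CLAIM (what is proved, stated in full; the proofs are below) =====
def Claim_equal_solve : Prop := ∀ (nums : List Int), Dom_solve nums → Spec_solve nums (solve nums)

-- ===== LEMMAS AND PROOFS =====

/-- The list of values A's loop feeds into `max`, given the keys seen so far. -/
def fired (seen : List Int) : List Int → List Int
  | [] => []
  | n :: t => (if (-n) ∈ seen ∨ n = 0 then [|n|] else []) ++ fired (n :: seen) t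

theorem le_foldl_max (l : List Int) (a : Int) : a ≤ l.foldl max a := by
  induction l generalizing a with
  | nil => simp
  | cons h t ih => exact le_trans (le_max_left a h) (ih _)

theorem mem_le_foldl_max {x : Int} {l : List Int} (a : Int) (hx : x ∈ l) :
    x ≤ l.foldl max a := by
  induction l generalizing a with
  | nil => cases hx
  | cons h t ih =>
    rcases List.mem_cons.1 hx with rfl | hx'
    · exact le_trans (le_max_right a x) (le_foldl_max t _)
    · exact ih _ hx'

theorem foldl_max_le {l : List Int} {a b : Int} (hab : a ≤ b)
    (h : ∀ x ∈ l, x ≤ b) : l.foldl max a ≤ b := by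
  induction l generalizing a with
  | nil => simpa using hab
  | cons hd t ih =>
    exact ih (max_le hab (h hd (List.mem_cons_self))) (fun x hx => h x (List.mem_cons_of_mem _ hx))

theorem foldl_max_eq_of_subsets {l1 l2 : List Int} (a : Int)
    (h12 : ∀ x ∈ l1, x ∈ l2) (h21 : ∀ x ∈ l2, x ∈ l1) :
    l1.foldl max a = l2.foldl max a := by
  apply le_antisymm
  · exact foldl_max_le (le_foldl_max l2 a) (fun x hx => mem_le_foldl_max a (h12 x hx))
  · exact foldl_max_le (le_foldl_max l1 a) (fun x hx => mem_le_foldl_max a (h21 x hx))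

/-- A's fold, abstracted: the dict only matters through its key set `seen`. -/
theorem solve_fold_eq_fired (l : List Int) (res : Int) (d : PySem.Dict Int Bool)
    (seen : List Int) (hd : ∀ k, d.contains k = true ↔ k ∈ seen) :
    (l.foldl
      (fun (st : Int × PySem.Dict Int Bool) n =>
        let res := if st.2.contains (-n) || n == 0 then max st.1 |n| else st.1
        (res, st.2.insert n true))
      (res, d)).1 = (fired seen l).foldl max res := by
  induction l generalizing res d seen with
  | nil => simp [fired]
  | cons n t ih =>
    have hcond : (d.contains (-n) || n == 0) = decide ((-n) ∈ seen ∨ n = 0) := by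
      by_cases h1 : (-n) ∈ seen
      · simp [(hd (-n)).2 h1, h1]
      · have : d.contains (-n) = false := by
          by_contra hc
          exact h1 ((hd (-n)).1 (by revert hc; cases d.contains (-n) <;> simp))
        by_cases h2 : n = 0 <;> simp [this, h1, h2]
    have hd' : ∀ k, (d.insert n true).contains k = true ↔ k ∈ (n :: seen) := by
      intro k
      rw [PySem.Dict.contains_insert]
      constructor
      · intro h
        rcases Bool.or_eq_true_iff.1 h with h | h
        · exact List.mem_cons.2 (Or.inl (by simpa using h))
        · exact List.mem_cons.2 (Or.inr ((hd k).1 h))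
      · intro h
        rcases List.mem_cons.1 h with rfl | h
        · simp
        · exact Bool.or_eq_true_iff.2 (Or.inr ((hd k).2 h))
    simp only [List.foldl_cons, fired]
    rw [ih _ _ _ hd']
    by_cases hc : (-n) ∈ seen ∨ n = 0
    · simp only [hcond, hc, decide_true]
      simp
    · simp only [hcond, hc, decide_false]
      simp

/-- Anything fired comes from an element whose negation occurs (in `seen` or in the list), or is 0. -/
theorem fired_src {x : Int} : ∀ {seen l : List Int}, x ∈ fired seen l →
    ∃ c, x = |c| ∧ c ∈ l ∧ ((-c) ∈ seen ∨ c = 0 ∨ (-c) ∈ l) := by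
  intro seen l
  induction l generalizing seen with
  | nil => intro h; cases h
  | cons n t ih =>
    intro h
    rcases List.mem_append.1 h with h | h
    · by_cases hc : (-n) ∈ seen ∨ n = 0
      · rw [if_pos hc] at h
        refine ⟨n, by simpa using h, List.mem_cons_self, ?_⟩
        rcases hc with hc | hc
        · exact Or.inl hc
        · exact Or.inr (Or.inl hc)
      · rw [if_neg hc] at h; cases h
    · rcases ih h with ⟨c, hx, hcl, hrest⟩
      refine ⟨c, hx, List.mem_cons_of_mem _ hcl, ?_⟩
      rcases hrest with hs | h0 | hl
      · rcases List.mem_cons.1 hs with h | h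
        · exact Or.inr (Or.inr (List.mem_cons.2 (Or.inl h)))
        · exact Or.inl h
      · exact Or.inr (Or.inl h0)
      · exact Or.inr (Or.inr (List.mem_cons_of_mem _ hl))

/-- Any element whose negation occurs (earlier or anywhere), or that is 0, fires. -/
theorem mem_fired : ∀ {l : List Int} (seen : List Int) (c : Int), c ∈ l →
    ((-c) ∈ seen ∨ c = 0 ∨ (-c) ∈ l) → |c| ∈ fired seen l := by
  intro l
  induction l with
  | nil => intro _ _ h; cases h
  | cons n t ih =>
    intro seen c hcl hcond
    rcases List.mem_cons.1 hcl with rfl | hct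
    · by_cases hfire : (-c) ∈ seen ∨ c = 0
      · exact List.mem_append.2 (Or.inl (by simp [if_pos hfire]))
      · push Not at hfire
        have hnt : (-c) ∈ t := by
          rcases hcond with h | h | h
          · exact absurd h hfire.1
          · exact absurd h hfire.2
          · rcases List.mem_cons.1 h with h | h
            · exact absurd (by omega : c = 0) hfire.2
            · exact h
        have : |(-c)| ∈ fired (c :: seen) t :=
          ih (c :: seen) (-c) hnt (Or.inl (by simp))
        exact List.mem_append.2 (Or.inr (by simpa using this))
    · have hcond' : (-c) ∈ (n :: seen) ∨ c = 0 ∨ (-c) ∈ t := by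
        rcases hcond with h | h | h
        · exact Or.inl (List.mem_cons_of_mem _ h)
        · exact Or.inr (Or.inl h)
        · rcases List.mem_cons.1 h with h | h
          · exact Or.inl (List.mem_cons.2 (Or.inl h))
          · exact Or.inr (Or.inr h)
      exact List.mem_append.2 (Or.inr (ih (n :: seen) c hct hcond'))

theorem fired_same_elems (nums : List Int) :
    (∀ x ∈ fired [] nums, x ∈ (nums.filter (fun n => PySem.Set.contains (PySem.Set.ofList nums) (-n))).map (fun n => |n|)) ∧
    (∀ x ∈ (nums.filter (fun n => PySem.Set.contains (PySem.Set.ofList nums) (-n))).map (fun n => |n|), x ∈ fired [] nums) := by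
  have hmemc : ∀ m : Int, PySem.Set.contains (PySem.Set.ofList nums) m = true ↔ m ∈ nums := by
    intro m
    rw [PySem.Set.contains_iff (PySem.Set.ofList nums) m]
    exact PySem.Set.mem_ofList nums m
  constructor
  · intro x hx
    rcases fired_src hx with ⟨c, rfl, hcl, hrest⟩
    have hneg : (-c) ∈ nums := by
      rcases hrest with h | h | h
      · cases h
      · simpa [h] using hcl
      · exact h
    exact List.mem_map.2 ⟨c, List.mem_filter.2 ⟨hcl, (hmemc (-c)).2 hneg⟩, rfl⟩
  · intro x hx
    rcases List.mem_map.1 hx with ⟨c, hcf, rfl⟩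
    rcases List.mem_filter.1 hcf with ⟨hcl, hcond⟩
    exact mem_fired [] c hcl (Or.inr (Or.inr ((hmemc (-c)).1 hcond)))

-- ===== VERDICT (by name: the statement is the Claim_ definition above) =====
theorem solve_spec : Claim_equal_solve := by
  intro nums _
  unfold Spec_solve solve solve_alt
  rw [solve_fold_eq_fired nums (-1) PySem.Dict.empty [] (by simp)]
  exact foldl_max_eq_of_subsets (-1) (fired_same_elems nums).1 (fired_same_elems nums).2
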